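-- pv_equiv track=rewrite | github.com/erxiaozhou/LWDIFF2024 | tester/extract_block_mutator/blockGenerator/util.py | get_get_eq_terminal_nodes
-- ===== SOURCE A (Python) =====
-- from typing import List, Dict
-- from itertools import chain
--
-- def get_get_eq_terminal_nodes(grammar: Dict[str, List[List[str]]]):
--     non_terminal_nodes = set(grammar.keys())
--     eq_terminal_nodes = set(chain(*chain(*grammar.values()))) - non_terminal_nodes
--     has_new_elem = False
--     first_time = True
--     while has_new_elem or first_time:
--         first_time = False
--         has_new_elem = False
--         for k, v in grammar.items():
--             if k in eq_terminal_nodes: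
--                 continue
--             all_elems = set(chain(*v))
--             if all([elem in eq_terminal_nodes for elem in all_elems]):
--                 eq_terminal_nodes.add(k)
--                 has_new_elem = True
--
--     return eq_terminal_nodes
-- ===== SOURCE B (Python) =====
-- def get_get_eq_terminal_nodes(grammar):
--     keys = set(grammar)
--     grounded = {s for alts in grammar.values() for alt in alts for s in alt} - keys
--     # per-key counter of distinct not-yet-grounded symbols + reverse dependency map
--     count = {}
--     rdeps = {}
--     for k, alts in grammar.items():
--         ksyms = {s for alt in alts for s in alt} & keys
--         count[k] = len(ksyms)
--         for s in ksyms: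
--             rdeps.setdefault(s, []).append(k)
--     pending = list(grammar)
--     progress = True
--     while progress and pending:
--         progress = False
--         remaining = []
--         for k in pending:
--             if count[k] == 0:
--                 grounded.add(k)
--                 for d in rdeps.get(k, []):
--                     count[d] -= 1
--                 progress = True
--             else:
--                 remaining.append(k)
--         pending = remaining
--     return grounded
-- ===== Notes on version B (the rewrite author's own statement) =====
-- stated objective: alternative
-- what changed: B precomputes a reverse-dependency map and a per-key counter of distinct ungrounded symbols once, then propagates groundings by decrementing dependents' counters over a shrinking pending list, instead of A's re-building every key's symbol set and re-testing all its members against the grounded set on every pass.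
import Mathlib
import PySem

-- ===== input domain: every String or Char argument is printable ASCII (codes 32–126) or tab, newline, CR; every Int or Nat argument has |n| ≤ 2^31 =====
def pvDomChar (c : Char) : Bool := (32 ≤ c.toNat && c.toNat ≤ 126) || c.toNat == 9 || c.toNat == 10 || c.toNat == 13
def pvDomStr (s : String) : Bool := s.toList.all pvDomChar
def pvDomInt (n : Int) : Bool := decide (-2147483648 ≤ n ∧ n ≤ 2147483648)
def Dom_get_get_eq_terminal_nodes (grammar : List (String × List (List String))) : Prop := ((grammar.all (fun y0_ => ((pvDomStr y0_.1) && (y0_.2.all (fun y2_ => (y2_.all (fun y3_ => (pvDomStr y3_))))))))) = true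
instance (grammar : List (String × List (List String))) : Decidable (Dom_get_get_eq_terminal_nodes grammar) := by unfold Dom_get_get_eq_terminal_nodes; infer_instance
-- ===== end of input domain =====

-- B replaces A's per-pass recomputation of every key's symbol set and membership tests by a
-- one-time reverse-dependency map with per-key counters of still-ungrounded distinct symbols,
-- decremented when a symbol grounds (counter/worklist propagation); same result set.
-- Python returns a set: the ports build it in deterministic first-insertion order (PySem.Set).

-- ===== PORT A =====
-- one fixpoint pass of A: for k, v in grammar.items(): skip grounded k, else test all elems
def aStep (acc : List String × Bool) (kv : String × List (List String)) : List String × Bool :=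
  if PySem.Set.contains acc.1 kv.1 then acc
  else if (PySem.Set.ofList kv.2.flatten).all (fun e => PySem.Set.contains acc.1 e) then
    (PySem.Set.add acc.1 kv.1, true)
  else acc

-- A's `while has_new_elem or first_time` loop; fuel is a totality guard only (each
-- repeated pass adds at least one of the ≤ items.length keys, so items.length + 1 passes suffice)
def aLoop : Nat → List (String × List (List String)) → List String → List String
  | 0, _, s => s
  | n + 1, items, s =>
    let r := items.foldl aStep (s, false)
    if r.2 then aLoop n items r.1 else r.1

def get_get_eq_terminal_nodes (grammar : List (String × List (List String))) : List String :=
  let d := PySem.Dict.ofList grammar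
  let nonTerminal := PySem.Set.ofList d.keys
  let eqTerminal0 := PySem.Set.diff (PySem.Set.ofList d.values.flatten.flatten) nonTerminal
  aLoop (d.items.length + 1) d.items eqTerminal0

-- ===== PORT B =====
-- {s for alt in alts for s in alt} & keys
def keySymsB (keys : List String) (v : List (List String)) : List String :=
  PySem.Set.inter (PySem.Set.ofList v.flatten) keys

-- the init loop: count[k] = len(ksyms); rdeps.setdefault(s, []).append(k) for s in ksyms
def initState (items : List (String × List (List String))) (keys : List String) :
    PySem.Dict String Int × PySem.Dict String (List String) :=
  items.foldl (fun st kv =>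
      (st.1.insert kv.1 ((keySymsB keys kv.2).length : Int),
       (keySymsB keys kv.2).foldl (fun r s => r.modify s [] (fun l => l ++ [kv.1])) st.2))
    (PySem.Dict.empty, PySem.Dict.empty)

-- for d in rdeps.get(k, []): count[d] -= 1
def decAll (cnt : PySem.Dict String Int) (ds : List String) : PySem.Dict String Int :=
  ds.foldl (fun c d => c.insert d (c.getD d 0 - 1)) cnt

-- one round over the pending keys: ground k if its counter is 0, else keep it
def bRound (rdeps : PySem.Dict String (List String))
    (st : PySem.Dict String Int × List String × List String × Bool) (k : String) :
    PySem.Dict String Int × List String × List String × Bool :=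
  if st.1.getD k 0 == 0 then
    (decAll st.1 (rdeps.getD k []), PySem.Set.add st.2.1 k, st.2.2.1, true)
  else (st.1, st.2.1, st.2.2.1 ++ [k], st.2.2.2)

-- B's `while progress and pending` loop; fuel is a totality guard only (each repeated pass shrinks pending)
def bLoop (rdeps : PySem.Dict String (List String)) :
    Nat → PySem.Dict String Int → List String → List String → List String
  | 0, _, g, _ => g
  | n + 1, cnt, g, pending =>
    if pending.isEmpty then g
    else
      let r := pending.foldl (bRound rdeps) (cnt, g, [], false)
      if r.2.2.2 then bLoop rdeps n r.1 r.2.1 r.2.2.1 else r.2.1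

def get_get_eq_terminal_nodes_alt (grammar : List (String × List (List String))) : List String :=
  let d := PySem.Dict.ofList grammar
  let keys := PySem.Set.ofList d.keys
  let grounded0 := PySem.Set.diff (PySem.Set.ofList d.values.flatten.flatten) keys
  let st := initState d.items keys
  bLoop st.2 (d.items.length + 1) st.1 grounded0 (d.items.map Prod.fst)

-- ===== PRECONDITION & SPEC =====
def Spec_get_get_eq_terminal_nodes (grammar : List (String × List (List String))) (out : List String) : Prop := out = get_get_eq_terminal_nodes_alt grammar
instance (grammar : List (String × List (List String))) (out : List String) : Decidable (Spec_get_get_eq_terminal_nodes grammar out) := by unfold Spec_get_get_eq_terminal_nodes; infer_instance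

-- ===== CLAIM (what is proved, stated in full; the proofs are below) =====
def Claim_equal_get_get_eq_terminal_nodes : Prop := ∀ (grammar : List (String × List (List String))), Dom_get_get_eq_terminal_nodes grammar → Spec_get_get_eq_terminal_nodes grammar (get_get_eq_terminal_nodes grammar)

-- ===== LEMMAS AND PROOFS =====

-- cnt is correct for grounded set g: each key's counter counts its distinct ungrounded symbols
def CntInv (itemsF : List (String × List (List String))) (keys : List String)
    (cnt : PySem.Dict String Int) (g : List String) : Prop :=
  ∀ kv ∈ itemsF, cnt.getD kv.1 0
    = (((keySymsB keys kv.2).filter (fun s => !PySem.Set.contains g s)).length : Int)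

-- every non-key symbol occurring in a production is grounded
def TermInv (itemsF : List (String × List (List String))) (keys : List String)
    (g : List String) : Prop :=
  ∀ kv ∈ itemsF, ∀ s ∈ PySem.Set.ofList kv.2.flatten,
    PySem.Set.contains keys s = false → PySem.Set.contains g s = true

lemma bangTrue (b : Bool) : (!b) = true ↔ b = false := by cases b <;> simp

lemma contains_not_mem (l : List String) (x : String) (h : x ∉ l) :
    PySem.Set.contains l x = false := by
  rw [← Bool.not_eq_true]
  intro hc
  exact h ((PySem.Set.contains_iff l x).mp hc)

lemma not_mem_of_contains_false (l : List String) (x : String)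
    (h : PySem.Set.contains l x = false) : x ∉ l := by
  intro hm
  rw [(PySem.Set.contains_iff l x).mpr hm] at h
  cases h

lemma contains_add_of (s : List String) (k x : String) (h : PySem.Set.contains s x = true) :
    PySem.Set.contains (PySem.Set.add s k) x = true := by
  rw [PySem.Set.contains_iff] at *
  exact (PySem.Set.mem_add _ _ _).mpr (Or.inl h)

lemma contains_add_ne (s : List String) (k x : String) (h : x ≠ k) :
    PySem.Set.contains (PySem.Set.add s k) x = PySem.Set.contains s x := by
  rw [Bool.eq_iff_iff, PySem.Set.contains_iff, PySem.Set.contains_iff, PySem.Set.mem_add]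
  simp [h]

lemma aFold_contains_mono (items : List (String × List (List String))) (s : List String)
    (f0 : Bool) (x : String) (h : PySem.Set.contains s x = true) :
    PySem.Set.contains (items.foldl aStep (s, f0)).1 x = true := by
  induction items generalizing s f0 with
  | nil => exact h
  | cons kv rest ih =>
    simp only [List.foldl_cons]
    unfold aStep
    split_ifs with h1 h2
    · exact ih s f0 h
    · exact ih _ _ (contains_add_of s kv.1 x h)
    · exact ih s f0 h

lemma aFold_contains_of_not (items : List (String × List (List String))) (s : List String)
    (f0 : Bool) (x : String) (hx : PySem.Set.contains s x = false)
    (hk : x ∉ items.map Prod.fst) :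
    PySem.Set.contains (items.foldl aStep (s, f0)).1 x = false := by
  induction items generalizing s f0 with
  | nil => exact hx
  | cons kv rest ih =>
    simp only [List.map_cons, List.mem_cons, not_or] at hk
    simp only [List.foldl_cons]
    unfold aStep
    split_ifs with h1 h2
    · exact ih s f0 hx hk.2
    · refine ih _ _ ?_ hk.2
      rw [contains_add_ne s kv.1 x hk.1]
      exact hx
    · exact ih s f0 hx hk.2

lemma nodup_keySymsB (keys : List String) (v : List (List String)) :
    (keySymsB keys v).Nodup :=
  (PySem.Set.nodup_ofList v.flatten).filter _

-- A's grounding test over the full symbol set ⇔ the filtered key-symbol list is empty,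
-- given every non-key symbol is already grounded
lemma cond_iff (keys g : List String) (v : List (List String))
    (hterm : ∀ s ∈ PySem.Set.ofList v.flatten,
      PySem.Set.contains keys s = false → PySem.Set.contains g s = true) :
    ((PySem.Set.ofList v.flatten).all (fun e => PySem.Set.contains g e) = true)
      ↔ (keySymsB keys v).filter (fun s => !PySem.Set.contains g s) = [] := by
  constructor
  · intro h
    rw [List.filter_eq_nil_iff]
    intro s hs
    have hsm : s ∈ PySem.Set.ofList v.flatten := List.mem_of_mem_filter hs
    have hm : s ∈ g := (PySem.Set.contains_iff g s).mp (List.all_eq_true.mp h s hsm)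
    simp [hm]
  · intro h
    rw [List.all_eq_true]
    intro s hs
    by_cases hk : PySem.Set.contains keys s = true
    · by_contra hg
      rw [Bool.not_eq_true] at hg
      have hmem : s ∈ keySymsB keys v := by
        unfold keySymsB PySem.Set.inter
        exact List.mem_filter.mpr ⟨hs, hk⟩
      have : s ∈ (keySymsB keys v).filter (fun s => !PySem.Set.contains g s) :=
        List.mem_filter.mpr ⟨hmem, (bangTrue _).mpr hg⟩
      rw [h] at this
      exact absurd this (List.not_mem_nil)
    · exact hterm s hs (Bool.not_eq_true _ ▸ eq_false_of_ne_true hk)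

-- the two components of the init loop, separated
lemma initState_eq (items : List (String × List (List String))) (keys : List String)
    (c : PySem.Dict String Int) (r : PySem.Dict String (List String)) :
    items.foldl (fun st kv =>
        (st.1.insert kv.1 ((keySymsB keys kv.2).length : Int),
         (keySymsB keys kv.2).foldl (fun r s => r.modify s [] (fun l => l ++ [kv.1])) st.2)) (c, r)
      = (items.foldl (fun c kv => c.insert kv.1 ((keySymsB keys kv.2).length : Int)) c,
         items.foldl (fun r kv =>
           (keySymsB keys kv.2).foldl (fun r s => r.modify s [] (fun l => l ++ [kv.1])) r) r) := by
  induction items generalizing c r with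
  | nil => rfl
  | cons kv rest ih => simp only [List.foldl_cons]; exact ih _ _

lemma getD_foldl_insert_of_not_mem (items : List (String × List (List String)))
    (f : String × List (List String) → Int) (c : PySem.Dict String Int) (k : String)
    (hk : k ∉ items.map Prod.fst) :
    (items.foldl (fun c kv => c.insert kv.1 (f kv)) c).getD k 0 = c.getD k 0 := by
  induction items generalizing c with
  | nil => rfl
  | cons kv rest ih =>
    simp only [List.map_cons, List.mem_cons, not_or] at hk
    simp only [List.foldl_cons]
    rw [ih _ hk.2, PySem.Dict.getD_insert, if_neg hk.1]

lemma cnt0_getD (items : List (String × List (List String))) (keys : List String)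
    (c : PySem.Dict String Int) (hnd : (items.map Prod.fst).Nodup)
    (kv : String × List (List String)) (hkv : kv ∈ items) :
    (items.foldl (fun c kv => c.insert kv.1 ((keySymsB keys kv.2).length : Int)) c).getD kv.1 0
      = ((keySymsB keys kv.2).length : Int) := by
  induction items generalizing c with
  | nil => exact absurd hkv (List.not_mem_nil)
  | cons kv' rest ih =>
    simp only [List.map_cons, List.nodup_cons] at hnd
    rcases List.mem_cons.mp hkv with h | h
    · subst h
      simp only [List.foldl_cons]
      rw [getD_foldl_insert_of_not_mem _ _ _ _ hnd.1, PySem.Dict.getD_insert, if_pos rfl]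
    · simp only [List.foldl_cons]
      exact ih _ hnd.2 h

-- filter-map of a nodup list of pairs with equal firsts
lemma filter_map_pair (L : List String) (k s : String) (hnd : L.Nodup) :
    ((L.map (fun x => (x, k))).filter (fun p => p.1 == s)).map (fun x => x.2)
      = if s ∈ L then [k] else [] := by
  induction L with
  | nil => simp
  | cons x L' ih =>
    simp only [List.nodup_cons] at hnd
    by_cases hx : x = s
    · subst hx
      simp only [List.map_cons, List.filter_cons, beq_self_eq_true, if_pos]
      have : ((L'.map (fun x => (x, k))).filter (fun p => p.1 == x)) = [] := by
        rw [List.filter_eq_nil_iff]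
        intro p hp
        rcases List.mem_map.mp hp with ⟨y, hy, rfl⟩
        simp only [beq_iff_eq]
        intro h; exact hnd.1 (h ▸ hy)
      simp [this, List.mem_cons]
    · have hpair : ((x, k).1 == s) = false := by simp [hx]
      simp only [List.map_cons, List.filter_cons, hpair, Bool.false_eq_true, if_false]
      rw [ih hnd.2]
      have hmem : (s ∈ x :: L') ↔ (s ∈ L') := by
        constructor
        · intro h
          rcases List.mem_cons.mp h with h | h
          · exact absurd h.symm hx
          · exact h
        · exact List.mem_cons_of_mem _
      rw [if_congr hmem rfl rfl]

-- rdeps characterization: rdeps[s] = keys (in dict order) whose symbol set contains s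
lemma rdeps_getD (items : List (String × List (List String))) (keys : List String)
    (r : PySem.Dict String (List String)) (s : String) :
    (items.foldl (fun r kv =>
        (keySymsB keys kv.2).foldl (fun r t => r.modify t [] (fun l => l ++ [kv.1])) r) r).getD s []
      = r.getD s [] ++ (items.filter (fun kv => s ∈ keySymsB keys kv.2)).map Prod.fst := by
  induction items generalizing r with
  | nil => simp
  | cons kv rest ih =>
    simp only [List.foldl_cons]
    rw [ih]
    have hinner : ((keySymsB keys kv.2).foldl
          (fun r t => r.modify t [] (fun l => l ++ [kv.1])) r).getD s []
        = r.getD s [] ++ (if s ∈ keySymsB keys kv.2 then [kv.1] else []) := by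
      have hm : (keySymsB keys kv.2).foldl (fun r t => r.modify t [] (fun l => l ++ [kv.1])) r
          = ((keySymsB keys kv.2).map (fun t => (t, kv.1))).foldl
              (fun r p => r.modify p.1 [] (fun l => l ++ [p.2])) r := by
        rw [List.foldl_map]
      rw [hm, PySem.Dict.getD_foldl_modify_append, filter_map_pair _ _ _ (nodup_keySymsB keys kv.2)]
    rw [hinner, List.filter_cons]
    by_cases hs : s ∈ keySymsB keys kv.2
    · simp [hs]
    · simp [hs]

-- decrementing along a nodup list
lemma decAll_getD (ds : List String) (cnt : PySem.Dict String Int) (d : String)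
    (hnd : ds.Nodup) :
    (decAll cnt ds).getD d 0 = cnt.getD d 0 - (if d ∈ ds then 1 else 0) := by
  induction ds generalizing cnt with
  | nil => simp [decAll]
  | cons x ds' ih =>
    simp only [List.nodup_cons] at hnd
    have hstep : decAll cnt (x :: ds') = decAll (cnt.insert x (cnt.getD x 0 - 1)) ds' := rfl
    rw [hstep, ih _ hnd.2, PySem.Dict.getD_insert]
    by_cases hd : d = x
    · subst hd
      simp [hnd.1, List.mem_cons]
    · simp [hd, List.mem_cons]

-- removing one element from a nodup filtered list
lemma filter_length_add (L : List String) (g : List String) (k : String)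
    (hnd : L.Nodup) (hkg : PySem.Set.contains g k = false) :
    ((L.filter (fun s => !PySem.Set.contains (PySem.Set.add g k) s)).length : Int)
      = ((L.filter (fun s => !PySem.Set.contains g s)).length : Int)
        - (if k ∈ L then 1 else 0) := by
  induction L with
  | nil => simp
  | cons x L' ih =>
    simp only [List.nodup_cons] at hnd
    rw [List.filter_cons, List.filter_cons]
    by_cases hx : x = k
    · subst hx
      have h1 : PySem.Set.contains (PySem.Set.add g x) x = true := by
        rw [PySem.Set.contains_iff]
        exact (PySem.Set.mem_add _ _ _).mpr (Or.inr rfl)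
      rw [h1, hkg]
      simp only [Bool.not_true, Bool.not_false, Bool.false_eq_true, if_false, if_true,
        List.length_cons]
      rw [ih hnd.2]
      have hni : x ∉ L' := hnd.1
      simp only [List.mem_cons, true_or]
      simp [hni]
    · have h1 := contains_add_ne g k x hx
      rw [h1]
      have hme : (k ∈ x :: L') ↔ (k ∈ L') := by
        constructor
        · intro h
          rcases List.mem_cons.mp h with h | h
          · exact absurd h.symm hx
          · exact h
        · exact List.mem_cons_of_mem _
      by_cases hgx : PySem.Set.contains g x = true
      · rw [hgx]
        simp only [Bool.not_true, Bool.false_eq_true, if_false]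
        rw [ih hnd.2, if_congr hme rfl rfl]
      · rw [Bool.not_eq_true] at hgx
        rw [hgx]
        simp only [Bool.not_false, if_true, List.length_cons]
        push_cast
        rw [ih hnd.2, if_congr hme rfl rfl]
        by_cases hkL : k ∈ L' <;> simp [hkL]

-- grounding key k updates the counters exactly as decAll along rdeps[k] does
lemma cntinv_step (itemsF : List (String × List (List String))) (keys : List String)
    (cnt : PySem.Dict String Int) (g : List String) (k : String)
    (hndF : (itemsF.map Prod.fst).Nodup)
    (hinv : CntInv itemsF keys cnt g)
    (hkg : PySem.Set.contains g k = false) :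
    CntInv itemsF keys
      (decAll cnt (((itemsF.filter (fun kv => k ∈ keySymsB keys kv.2)).map Prod.fst)))
      (PySem.Set.add g k) := by
  intro kv hkv
  have hndL : ((itemsF.filter (fun kv => k ∈ keySymsB keys kv.2)).map Prod.fst).Nodup := by
    have hsubl : ((itemsF.filter (fun kv => k ∈ keySymsB keys kv.2)).map Prod.fst).Sublist
        (itemsF.map Prod.fst) := List.Sublist.map Prod.fst List.filter_sublist
    exact hndF.sublist hsubl
  rw [decAll_getD _ _ _ hndL, hinv kv hkv,
    filter_length_add _ _ _ (nodup_keySymsB keys kv.2) hkg]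
  congr 1
  have : kv.1 ∈ (itemsF.filter (fun kv => k ∈ keySymsB keys kv.2)).map Prod.fst
      ↔ k ∈ keySymsB keys kv.2 := by
    constructor
    · intro h
      rcases List.mem_map.mp h with ⟨kv', hkv', heq⟩
      have hkv'2 := List.mem_of_mem_filter hkv'
      have := List.inj_on_of_nodup_map hndF hkv'2 hkv heq
      have hp := List.of_mem_filter hkv'
      simp only [decide_eq_true_eq] at hp
      exact this ▸ hp
    · intro h
      exact List.mem_map.mpr ⟨kv, List.mem_filter.mpr ⟨hkv, by simp [h]⟩, rfl⟩
  rw [if_congr this rfl rfl]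

-- shorthand: the rdeps dict the B port builds
def rdepsOf (itemsF : List (String × List (List String))) (keys : List String) :
    PySem.Dict String (List String) :=
  itemsF.foldl (fun r kv =>
    (keySymsB keys kv.2).foldl (fun r t => r.modify t [] (fun l => l ++ [kv.1])) r)
    PySem.Dict.empty

lemma terminv_mono (itemsF : List (String × List (List String))) (keys g : List String)
    (k : String) (hterm : TermInv itemsF keys g) :
    TermInv itemsF keys (PySem.Set.add g k) := by
  intro kv hkv s hs hsk
  exact contains_add_of _ _ _ (hterm kv hkv s hs hsk)

-- one round of B over the pending keys = one pass of A over all items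
lemma pass_equiv (itemsF : List (String × List (List String))) (keys : List String)
    (hndF : (itemsF.map Prod.fst).Nodup)
    (items : List (String × List (List String))) (g racc : List String) (f0 : Bool)
    (cnt : PySem.Dict String Int)
    (hnd : (items.map Prod.fst).Nodup)
    (hsub : ∀ kv ∈ items, kv ∈ itemsF)
    (hinv : CntInv itemsF keys cnt g)
    (hterm : TermInv itemsF keys g) :
    ((items.filter (fun kv => !PySem.Set.contains g kv.1)).map Prod.fst).foldl
        (bRound (rdepsOf itemsF keys)) (cnt, g, racc, f0)
      = ((((items.filter (fun kv => !PySem.Set.contains g kv.1)).map Prod.fst).foldl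
            (bRound (rdepsOf itemsF keys)) (cnt, g, racc, f0)).1,
         (items.foldl aStep (g, f0)).1,
         racc ++ (items.filter
           (fun kv => !PySem.Set.contains (items.foldl aStep (g, f0)).1 kv.1)).map Prod.fst,
         (items.foldl aStep (g, f0)).2)
      ∧ CntInv itemsF keys
          ((((items.filter (fun kv => !PySem.Set.contains g kv.1)).map Prod.fst).foldl
            (bRound (rdepsOf itemsF keys)) (cnt, g, racc, f0)).1)
          ((items.foldl aStep (g, f0)).1) := by
  induction items generalizing g racc f0 cnt with
  | nil => exact ⟨by simp, hinv⟩
  | cons kv rest ih =>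
    simp only [List.map_cons, List.nodup_cons] at hnd
    obtain ⟨hk, hrest⟩ := hnd
    have hsubr : ∀ kv' ∈ rest, kv' ∈ itemsF := fun kv' h => hsub kv' (List.mem_cons_of_mem _ h)
    by_cases h1 : PySem.Set.contains g kv.1 = true
    · -- kv already grounded: A skips it, B's pending never contained it
      have hskip : aStep (g, f0) kv = (g, f0) := by unfold aStep; rw [h1]; simp
      have hA1 : PySem.Set.contains (rest.foldl aStep (g, f0)).1 kv.1 = true :=
        aFold_contains_mono rest g f0 kv.1 h1
      have h1m : kv.1 ∈ g := (PySem.Set.contains_iff _ _).mp h1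
      have hfcons : (kv :: rest).filter (fun kv' => !PySem.Set.contains g kv'.1)
          = rest.filter (fun kv' => !PySem.Set.contains g kv'.1) := by simp [h1m]
      have hA1m : kv.1 ∈ (rest.foldl aStep (g, f0)).1 := (PySem.Set.contains_iff _ _).mp hA1
      have hfcons2 : (kv :: rest).filter
            (fun kv' => !PySem.Set.contains (rest.foldl aStep (g, f0)).1 kv'.1)
          = rest.filter (fun kv' => !PySem.Set.contains (rest.foldl aStep (g, f0)).1 kv'.1) := by
        simp [hA1m]
      rw [hfcons]
      have := ih g racc f0 cnt hrest hsubr hinv hterm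
      simp only [List.foldl_cons, hskip, hfcons2]
      exact this
    · rw [Bool.not_eq_true] at h1
      have hkvF : kv ∈ itemsF := hsub kv (List.mem_cons_self)
      have h1m : kv.1 ∉ g := fun hm => by
        rw [(PySem.Set.contains_iff _ _).mpr hm] at h1
        exact absurd h1 (by simp)
      have hfcons : (kv :: rest).filter (fun kv' => !PySem.Set.contains g kv'.1)
          = kv :: rest.filter (fun kv' => !PySem.Set.contains g kv'.1) := by simp [h1m]
      have hcnt := hinv kv hkvF
      have htermv : ∀ s ∈ PySem.Set.ofList kv.2.flatten,
          PySem.Set.contains keys s = false → PySem.Set.contains g s = true :=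
        fun s hs h => hterm kv hkvF s hs h
      by_cases hc : (PySem.Set.ofList kv.2.flatten).all (fun e => PySem.Set.contains g e) = true
      · -- kv grounds in this round in both programs
        have hfe : (keySymsB keys kv.2).filter (fun s => !PySem.Set.contains g s) = [] :=
          (cond_iff keys g kv.2 htermv).mp hc
        have hzero : cnt.getD kv.1 0 = 0 := by rw [hcnt, hfe]; rfl
        have hstepA : aStep (g, f0) kv = (PySem.Set.add g kv.1, true) := by
          unfold aStep; rw [h1, hc]; simp
        have hrd : (rdepsOf itemsF keys).getD kv.1 []
            = (itemsF.filter (fun kv' => kv.1 ∈ keySymsB keys kv'.2)).map Prod.fst := by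
          unfold rdepsOf
          rw [rdeps_getD]
          simp [PySem.Dict.getD_empty]
        have hstepB : bRound (rdepsOf itemsF keys) (cnt, g, racc, f0) kv.1
            = (decAll cnt ((itemsF.filter (fun kv' => kv.1 ∈ keySymsB keys kv'.2)).map Prod.fst),
               PySem.Set.add g kv.1, racc, true) := by
          unfold bRound
          rw [hrd]
          simp [hzero]
        have hinv' := cntinv_step itemsF keys cnt g kv.1 hndF hinv h1
        have hfiltr : rest.filter (fun kv' => !PySem.Set.contains g kv'.1)
            = rest.filter (fun kv' => !PySem.Set.contains (PySem.Set.add g kv.1) kv'.1) := by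
          apply List.filter_congr
          intro kv' hkv'
          rw [contains_add_ne g kv.1 kv'.1]
          intro heq
          exact hk (heq ▸ List.mem_map_of_mem hkv')
        have hadd : PySem.Set.contains (PySem.Set.add g kv.1) kv.1 = true := by
          rw [PySem.Set.contains_iff]
          exact (PySem.Set.mem_add _ _ _).mpr (Or.inr rfl)
        have hA1 : PySem.Set.contains
            (rest.foldl aStep (PySem.Set.add g kv.1, true)).1 kv.1 = true :=
          aFold_contains_mono rest _ true kv.1 hadd
        have hA1m : kv.1 ∈ (rest.foldl aStep (PySem.Set.add g kv.1, true)).1 :=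
          (PySem.Set.contains_iff _ _).mp hA1
        have hfcons2 : (kv :: rest).filter
              (fun kv' => !PySem.Set.contains (rest.foldl aStep (PySem.Set.add g kv.1, true)).1 kv'.1)
            = rest.filter
              (fun kv' => !PySem.Set.contains (rest.foldl aStep (PySem.Set.add g kv.1, true)).1 kv'.1) := by
          simp [hA1m]
        rw [hfcons]
        simp only [List.map_cons, List.foldl_cons, hstepB, hfiltr]
        have := ih (PySem.Set.add g kv.1) racc true _ hrest hsubr hinv'
          (terminv_mono itemsF keys g kv.1 hterm)
        simp only [hstepA, hfcons2]
        exact this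
      · -- kv stays pending / ungrounded in both programs
        have hfe : (keySymsB keys kv.2).filter (fun s => !PySem.Set.contains g s) ≠ [] :=
          fun h => hc ((cond_iff keys g kv.2 htermv).mpr h)
        have hlen : ((keySymsB keys kv.2).filter (fun s => !PySem.Set.contains g s)).length ≠ 0 :=
          fun h => hfe (List.length_eq_zero_iff.mp h)
        have hnz : ¬ (cnt.getD kv.1 0 == 0) = true := by
          rw [hcnt]
          simp only [beq_iff_eq]
          exact_mod_cast hlen
        have hc' : ((PySem.Set.ofList kv.2.flatten).all (fun e => PySem.Set.contains g e)) = false :=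
          eq_false_of_ne_true hc
        have hstepA : aStep (g, f0) kv = (g, f0) := by
          unfold aStep; rw [h1, hc']; simp
        have hstepB : bRound (rdepsOf itemsF keys) (cnt, g, racc, f0) kv.1
            = (cnt, g, racc ++ [kv.1], f0) := by
          unfold bRound
          rw [if_neg hnz]
        have hA1 : PySem.Set.contains (rest.foldl aStep (g, f0)).1 kv.1 = false :=
          aFold_contains_of_not rest g f0 kv.1 h1 (fun hm => hk hm)
        have hA1m : kv.1 ∉ (rest.foldl aStep (g, f0)).1 := fun hm => by
          rw [(PySem.Set.contains_iff _ _).mpr hm] at hA1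
          exact absurd hA1 (by simp)
        have hfcons2 : (kv :: rest).filter
              (fun kv' => !PySem.Set.contains (rest.foldl aStep (g, f0)).1 kv'.1)
            = kv :: rest.filter (fun kv' => !PySem.Set.contains (rest.foldl aStep (g, f0)).1 kv'.1) := by
          simp [hA1m]
        rw [hfcons]
        simp only [List.map_cons, List.foldl_cons, hstepB]
        have := ih g (racc ++ [kv.1]) f0 cnt hrest hsubr hinv hterm
        simp only [hstepA, hfcons2]
        rw [this.1]
        refine ⟨?_, this.2⟩
        simp

-- B's counter loop started on the still-ungrounded keys = A's flagged full-rescan loop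
lemma loop_equiv (itemsF : List (String × List (List String))) (keys : List String)
    (hndF : (itemsF.map Prod.fst).Nodup) (fuel : Nat) (g : List String)
    (cnt : PySem.Dict String Int)
    (hinv : CntInv itemsF keys cnt g)
    (hterm : TermInv itemsF keys g) :
    bLoop (rdepsOf itemsF keys) fuel cnt g
        ((itemsF.filter (fun kv => !PySem.Set.contains g kv.1)).map Prod.fst)
      = aLoop fuel itemsF g := by
  induction fuel generalizing g cnt with
  | zero => rfl
  | succ n ih =>
    have hpass := pass_equiv itemsF keys hndF itemsF g [] false cnt hndF
      (fun kv h => h) hinv hterm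
    unfold bLoop aLoop
    by_cases hemp : (itemsF.filter (fun kv => !PySem.Set.contains g kv.1)) = []
    · rw [hemp] at hpass ⊢
      simp only [List.map_nil, List.foldl_nil, Prod.mk.injEq] at hpass
      obtain ⟨⟨_, h1, _, h3⟩, _⟩ := hpass
      simp [← h1, ← h3]
    · have hne : ¬ ((itemsF.filter (fun kv => !PySem.Set.contains g kv.1)).map Prod.fst).isEmpty = true := by
        simp only [List.isEmpty_iff, List.map_eq_nil_iff]
        exact hemp
      rw [if_neg hne]
      rw [hpass.1]
      by_cases hflag : (itemsF.foldl aStep (g, false)).2 = true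
      · simp only [hflag, if_true, List.nil_append]
        have hinv' := hpass.2
        rw [hpass.1] at hinv'
        exact ih (itemsF.foldl aStep (g, false)).1 _ hinv'
          (fun kv h s hs hns => aFold_contains_mono _ _ _ _ (hterm kv h s hs hns))
      · rw [Bool.not_eq_true] at hflag
        simp [hflag]

-- ===== VERDICT (by name: the statement is the Claim_ definition above) =====
theorem get_get_eq_terminal_nodes_spec : Claim_equal_get_get_eq_terminal_nodes := by
  intro grammar _
  unfold Spec_get_get_eq_terminal_nodes get_get_eq_terminal_nodes get_get_eq_terminal_nodes_alt
  show aLoop ((PySem.Dict.ofList grammar).items.length + 1) (PySem.Dict.ofList grammar).items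
      (PySem.Set.diff (PySem.Set.ofList (PySem.Dict.ofList grammar).values.flatten.flatten)
        (PySem.Set.ofList (PySem.Dict.ofList grammar).keys))
    = bLoop (initState (PySem.Dict.ofList grammar).items
        (PySem.Set.ofList (PySem.Dict.ofList grammar).keys)).2
        ((PySem.Dict.ofList grammar).items.length + 1)
        (initState (PySem.Dict.ofList grammar).items
          (PySem.Set.ofList (PySem.Dict.ofList grammar).keys)).1
        (PySem.Set.diff (PySem.Set.ofList (PySem.Dict.ofList grammar).values.flatten.flatten)
          (PySem.Set.ofList (PySem.Dict.ofList grammar).keys))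
        ((PySem.Dict.ofList grammar).items.map Prod.fst)
  have hnd : ((PySem.Dict.ofList grammar).items.map Prod.fst).Nodup :=
    PySem.Dict.nodup_keys_ofList grammar
  set d := PySem.Dict.ofList grammar with hd
  set keys := PySem.Set.ofList d.keys with hkeys
  set g0 := PySem.Set.diff (PySem.Set.ofList d.values.flatten.flatten) keys with hg0
  have hkeysnc : ∀ kv ∈ d.items, PySem.Set.contains g0 kv.1 = false := by
    intro kv hkv
    apply contains_not_mem
    rw [hg0]
    intro hmem
    have h2 := (PySem.Set.mem_diff _ _ _).mp hmem
    apply h2.2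
    rw [hkeys, PySem.Set.mem_ofList]
    exact List.mem_map_of_mem hkv
  have hfilt : d.items.filter (fun kv => !PySem.Set.contains g0 kv.1) = d.items := by
    apply List.filter_eq_self.mpr
    intro kv hkv
    exact (bangTrue _).mpr (hkeysnc kv hkv)
  have hterm0 : TermInv d.items keys g0 := by
    intro kv hkv s hs hns
    rw [PySem.Set.contains_iff, hg0]
    apply (PySem.Set.mem_diff _ _ _).mpr
    refine ⟨?_, not_mem_of_contains_false _ _ hns⟩
    rw [PySem.Set.mem_ofList]
    rw [PySem.Set.mem_ofList] at hs
    rcases List.mem_flatten.mp hs with ⟨alt, halt, hsalt⟩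
    apply List.mem_flatten.mpr
    refine ⟨alt, ?_, hsalt⟩
    apply List.mem_flatten.mpr
    refine ⟨kv.2, ?_, halt⟩
    show kv.2 ∈ d.values
    unfold PySem.Dict.values
    exact List.mem_map_of_mem hkv
  have hinv0 : CntInv d.items keys (initState d.items keys).1 g0 := by
    intro kv hkv
    have h1 : (initState d.items keys).1
        = d.items.foldl (fun c kv => c.insert kv.1 ((keySymsB keys kv.2).length : Int))
            PySem.Dict.empty := by
      unfold initState
      rw [initState_eq]
    rw [h1, cnt0_getD _ _ _ hnd kv hkv]
    congr 1
    have heq : (keySymsB keys kv.2).filter (fun s => !PySem.Set.contains g0 s)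
        = keySymsB keys kv.2 := by
      apply List.filter_eq_self.mpr
      intro t htm
      apply (bangTrue _).mpr
      apply contains_not_mem
      rw [hg0]
      intro hmem
      have h2 := (PySem.Set.mem_diff _ _ _).mp hmem
      apply h2.2
      rw [hkeys]
      rw [hkeys] at htm
      exact (PySem.Set.contains_iff _ _).mp (List.of_mem_filter htm)
    rw [heq]
  have hrdeps : (initState d.items keys).2 = rdepsOf d.items keys := by
    unfold initState rdepsOf
    rw [initState_eq]
  rw [hrdeps]
  have hpend : d.items.map Prod.fst
      = (d.items.filter (fun kv => !PySem.Set.contains g0 kv.1)).map Prod.fst := by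
    rw [hfilt]
  rw [hpend]
  exact (loop_equiv d.items keys hnd (d.items.length + 1) g0 _ hinv0 hterm0).symm
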